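-- pv_equiv track=rewrite | github.com/ElinorCoding/web_se_ex1 | ex1_wsy/pw_analy3_wsy.py | password_to_structure
-- ===== SOURCE A (Python) =====
-- def password_to_structure(password, date_candidates):
--     s = password
--     structure = ''
--     i = 0
--     sorted_dates = sorted(date_candidates, key=lambda x: -len(x))
--     while i < len(s):
--         matched_date = None
--         for d in sorted_dates:
--             if s.startswith(d, i):
--                 matched_date = d
--                 break
--         if matched_date:
--             structure += 'N' * len(matched_date)
--             i += len(matched_date)
--         else:
--             ch = s[i]
--             if ch.isalpha():
--                 structure += 'L'
--             elif ch.isdigit():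
--                 structure += 'D'
--             else:
--                 structure += 'S'
--             i += 1
--     return structure
-- ===== SOURCE B (Python) =====
-- def password_to_structure(password, date_candidates):
--     # Trie of the nonempty date candidates; one longest-prefix walk per position
--     # replaces A's per-position startswith scan over every candidate. Exact because
--     # A's first hit in length-descending order has exactly the maximal matching
--     # length, the output depends only on that length, and an empty candidate is
--     # falsy in A (it falls through to the character branch).
--     END = ''
--     root = {}
--     for d in date_candidates:
--         if d:
--             node = root
--             for c in d:
--                 node = node.setdefault(c, {})
--             node[END] = True
--     n = len(password)
--     out = []
--     i = 0
--     while i < n: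
--         node = root
--         best = 0
--         j = i
--         while j < n and password[j] in node:
--             node = node[password[j]]
--             j += 1
--             if END in node:
--                 best = j - i
--         if best:
--             out.append('N' * best)
--             i += best
--         else:
--             c = password[i]
--             out.append('L' if c.isalpha() else 'D' if c.isdigit() else 'S')
--             i += 1
--     return ''.join(out)
-- ===== Notes on version B (the rewrite author's own statement) =====
-- stated objective: faster
-- what changed: Builds a trie of the nonempty date candidates once and finds the longest matching candidate at each position by a single trie walk, instead of A's per-position startswith scan over the whole length-sorted candidate list.
import Mathlib
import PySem

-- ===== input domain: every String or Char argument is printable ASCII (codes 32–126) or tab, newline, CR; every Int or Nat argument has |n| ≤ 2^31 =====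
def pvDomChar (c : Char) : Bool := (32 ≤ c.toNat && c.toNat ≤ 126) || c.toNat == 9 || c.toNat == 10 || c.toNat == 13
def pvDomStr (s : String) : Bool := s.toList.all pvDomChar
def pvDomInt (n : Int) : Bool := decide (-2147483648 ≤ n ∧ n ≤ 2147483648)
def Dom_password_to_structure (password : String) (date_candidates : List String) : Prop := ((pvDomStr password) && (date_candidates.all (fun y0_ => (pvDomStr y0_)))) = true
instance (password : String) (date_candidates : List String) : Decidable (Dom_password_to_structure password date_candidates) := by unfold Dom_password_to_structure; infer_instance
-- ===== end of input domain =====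

-- B builds a trie of the nonempty candidates once and takes one longest-prefix
-- walk per position, instead of A's per-position startswith scan (objective: faster).

-- ===== PORT A =====
-- A's while-loop over the index i, ported as recursion on the remaining suffix
-- (s.startswith(d, i) with 0 ≤ i ≤ len(s) is exactly: d is a prefix of the suffix).
-- The inner 'for d in sorted_dates: … break' is List.find?; 'if matched_date:' is
-- Python truthiness, so an empty matched date falls through to the character branch.
def pvLoopA (sortedDates : List (List Char)) : List Char → List Char
  | [] => []
  | ch :: rest =>
    match sortedDates.find? (fun d => PySem.Chars.startswith (ch :: rest) d) with
    | some d =>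
      if _h : d = [] then
        (if PySem.Chars.isalpha ch then 'L' else if PySem.Chars.isdigit ch then 'D' else 'S')
          :: pvLoopA sortedDates rest
      else
        List.replicate d.length 'N' ++ pvLoopA sortedDates ((ch :: rest).drop d.length)
    | none =>
      (if PySem.Chars.isalpha ch then 'L' else if PySem.Chars.isdigit ch then 'D' else 'S')
        :: pvLoopA sortedDates rest
  termination_by s => s.length
  decreasing_by
  · simp
  · have : 1 ≤ d.length := List.length_pos_iff.mpr _h
    simp; omega

def password_to_structure (password : String) (date_candidates : List String) : String :=
  let s := password.toList
  let sortedDates := PySem.List.sorted (date_candidates.map String.toList) (fun d => -((d.length : Int))) false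
  String.ofList (pvLoopA sortedDates s)

-- ===== PORT B =====
-- B's dict-of-dicts trie (terminal marker = the '' key): a node is its terminal
-- flag paired with its child list; each child-list entry carries the edge char and
-- the child's flag and child list (one inductive, so no nested/mutual types).
inductive PTrieL where
  | nil : PTrieL
  | cons : Char → Bool → PTrieL → PTrieL → PTrieL

-- `c in node` / `node[c]` on the child list
def pvChild : PTrieL → Char → Option (Bool × PTrieL)
  | .nil, _ => none
  | .cons c' b k r, c => if c = c' then some (b, k) else pvChild r c

-- node.setdefault(c, {}): existing child, or a fresh empty node
def pvGetChild (l : PTrieL) (c : Char) : Bool × PTrieL :=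
  match pvChild l c with
  | some t => t
  | none => (false, .nil)

def pvSetChild : PTrieL → Char → Bool × PTrieL → PTrieL
  | .nil, c, t => .cons c t.1 t.2 .nil
  | .cons c' b k r, c, t => if c = c' then .cons c' t.1 t.2 r else .cons c' b k (pvSetChild r c t)

-- the inner 'for c in d: node = node.setdefault(c, {})' plus 'node[END] = True',
-- ported functionally (B's dict mutation is not observable from outside the build)
def pvInsert : Bool × PTrieL → List Char → Bool × PTrieL
  | t, [] => (true, t.2)
  | t, c :: w => (t.1, pvSetChild t.2 c (pvInsert (pvGetChild t.2 c) w))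

-- the build loop over date_candidates ('if d:' filters empty candidates)
def pvBuild (ws : List (List Char)) : Bool × PTrieL :=
  (ws.filter (fun d => !d.isEmpty)).foldl pvInsert (false, .nil)

-- B's inner while: follow children while possible, j counts consumed chars,
-- best records the last j at which the reached node was terminal
def pvWalk : Bool × PTrieL → List Char → Nat → Nat → Nat
  | _, [], _, best => best
  | t, c :: w, j, best =>
    match pvChild t.2 c with
    | none => best
    | some t' => pvWalk t' w (j + 1) (if t'.1 then j + 1 else best)

-- B's outer while over the index i, as recursion on the remaining suffix
def pvLoopB (trie : Bool × PTrieL) : List Char → List Char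
  | [] => []
  | ch :: rest =>
    let best := pvWalk trie (ch :: rest) 0 0
    if _h : best = 0 then
      (if PySem.Chars.isalpha ch then 'L' else if PySem.Chars.isdigit ch then 'D' else 'S')
        :: pvLoopB trie rest
    else
      List.replicate best 'N' ++ pvLoopB trie ((ch :: rest).drop best)
  termination_by s => s.length
  decreasing_by
  · simp
  · simp; omega

def password_to_structure_alt (password : String) (date_candidates : List String) : String :=
  let trie := pvBuild (date_candidates.map String.toList)
  String.ofList (pvLoopB trie password.toList)

-- ===== PRECONDITION & SPEC =====
def Spec_password_to_structure (password : String) (date_candidates : List String) (out : String) : Prop := out = password_to_structure_alt password date_candidates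
instance (password : String) (date_candidates : List String) (out : String) : Decidable (Spec_password_to_structure password date_candidates out) := by unfold Spec_password_to_structure; infer_instance

-- ===== CLAIM (what is proved, stated in full; the proofs are below) =====
def Claim_equal_password_to_structure : Prop := ∀ (password : String) (date_candidates : List String), Dom_password_to_structure password date_candidates → Spec_password_to_structure password date_candidates (password_to_structure password date_candidates)

-- ===== LEMMAS AND PROOFS =====

-- proof-side characterisation of the trie: the set of words it accepts
def pvMem : Bool × PTrieL → List Char → Bool
  | t, [] => t.1
  | t, c :: w =>
    match pvChild t.2 c with
    | some t' => pvMem t' w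
    | none => false

theorem pvMem_empty (v : List Char) : pvMem (false, .nil) v = false := by
  cases v <;> simp [pvMem, pvChild]

theorem pvChild_setChild (l : PTrieL) (c : Char) (t : Bool × PTrieL) (x : Char) :
    pvChild (pvSetChild l c t) x = if x = c then some t else pvChild l x := by
  induction l with
  | nil => simp [pvSetChild, pvChild]
  | cons c' b k r ihk ihr =>
    simp only [pvSetChild]
    by_cases h : c = c'
    · subst h
      by_cases hx : x = c <;> simp [pvChild, hx]
    · rw [if_neg h]
      by_cases hx : x = c'
      · subst hx; simp [pvChild, Ne.symm h]
      · simp [pvChild, hx, ihr]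

theorem pvMem_insert (w : List Char) : ∀ (t : Bool × PTrieL) (v : List Char),
    pvMem (pvInsert t w) v = (decide (v = w) || pvMem t v) := by
  induction w with
  | nil =>
    intro t v
    cases v with
    | nil => simp [pvInsert, pvMem]
    | cons x v' => simp [pvInsert, pvMem]
  | cons c w' ih =>
    intro t v
    cases v with
    | nil => simp [pvInsert, pvMem]
    | cons x v' =>
      simp only [pvInsert, pvMem, pvChild_setChild]
      by_cases hx : x = c
      · subst hx
        cases hc : pvChild t.2 x with
        | some u => simp only [pvGetChild, hc]; simpa using ih u v'
        | none => simp only [pvGetChild, hc]; simp [ih, pvMem_empty]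
      · simp only [if_neg hx]
        cases pvChild t.2 x <;> simp [hx]

theorem pvMem_build (ws : List (List Char)) (v : List Char) :
    pvMem (pvBuild ws) v = true ↔ v ∈ ws ∧ v ≠ [] := by
  have key : ∀ (l : List (List Char)) (t : Bool × PTrieL),
      pvMem (l.foldl pvInsert t) v = true ↔ v ∈ l ∨ pvMem t v = true := by
    intro l
    induction l with
    | nil => intro t; simp
    | cons w r ih =>
      intro t
      rw [List.foldl_cons, ih, pvMem_insert]
      simp only [List.mem_cons, Bool.or_eq_true, decide_eq_true_eq]
      tauto
  rw [pvBuild, key, pvMem_empty]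
  simp [List.mem_filter, and_comm]

-- the longest accepted nonempty prefix, as a recursive spec for pvWalk
def pvLongest? : Bool × PTrieL → List Char → Option Nat
  | _, [] => none
  | t, c :: w =>
    match pvChild t.2 c with
    | none => none
    | some t' =>
      match pvLongest? t' w with
      | some k => some (k + 1)
      | none => if t'.1 then some 1 else none

theorem pvWalk_eq_longest (s : List Char) : ∀ (t : Bool × PTrieL) (j best : Nat), best ≤ j →
    pvWalk t s j best = match pvLongest? t s with | some k => j + k | none => best := by
  induction s with
  | nil => intro t j best _; simp [pvWalk, pvLongest?]
  | cons c w ih =>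
    intro t j best hle
    simp only [pvWalk, pvLongest?]
    cases hc : pvChild t.2 c with
    | none => simp
    | some t' =>
      simp only
      rw [ih t' (j + 1) _ (by split_ifs <;> omega)]
      cases pvLongest? t' w with
      | some k => simp [Nat.add_assoc, Nat.add_comm 1 k]
      | none => simp; split_ifs <;> simp_all

theorem pvLongest_some (s : List Char) : ∀ (t : Bool × PTrieL) (k : Nat),
    pvLongest? t s = some k → 1 ≤ k ∧ k ≤ s.length ∧ pvMem t (s.take k) = true := by
  induction s with
  | nil => intro t k h; simp [pvLongest?] at h
  | cons c w ih =>
    intro t k h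
    simp only [pvLongest?] at h
    cases hc : pvChild t.2 c with
    | none => rw [hc] at h; cases h
    | some t' =>
      rw [hc] at h
      simp only at h
      cases hl : pvLongest? t' w with
      | some k' =>
        rw [hl] at h
        cases h
        obtain ⟨h1, h2, h3⟩ := ih t' k' hl
        refine ⟨by omega, by simp; omega, ?_⟩
        rw [List.take_succ_cons]
        simpa [pvMem, hc] using h3
      | none =>
        rw [hl] at h
        split_ifs at h with ht
        cases h
        exact ⟨le_refl _, by simp, by simp [pvMem, hc, ht]⟩

theorem pvLongest_none (s : List Char) : ∀ (t : Bool × PTrieL),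
    pvLongest? t s = none → ∀ j, 1 ≤ j → j ≤ s.length → pvMem t (s.take j) = false := by
  induction s with
  | nil => intro t _ j h1 h2; simp at h2; omega
  | cons c w ih =>
    intro t h j h1 h2
    simp only [pvLongest?] at h
    obtain ⟨j', rfl⟩ : ∃ j', j = j' + 1 := ⟨j - 1, by omega⟩
    rw [List.take_succ_cons]
    cases hc : pvChild t.2 c with
    | none => simp [pvMem, hc]
    | some t' =>
      rw [hc] at h
      simp only at h
      cases hl : pvLongest? t' w with
      | some k => rw [hl] at h; cases h
      | none =>
        rw [hl] at h
        split_ifs at h with ht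
        simp only [pvMem, hc]
        cases j' with
        | zero => simpa [List.take_zero, pvMem] using ht
        | succ j'' => exact ih t' hl (j'' + 1) (by omega) (by simp at h2; omega)

theorem pvLongest_max (s : List Char) : ∀ (t : Bool × PTrieL) (k : Nat),
    pvLongest? t s = some k → ∀ j, k < j → j ≤ s.length → pvMem t (s.take j) = false := by
  induction s with
  | nil => intro t k h; simp [pvLongest?] at h
  | cons c w ih =>
    intro t k h j hkj hj
    simp only [pvLongest?] at h
    obtain ⟨j', rfl⟩ : ∃ j', j = j' + 1 := ⟨j - 1, by omega⟩
    rw [List.take_succ_cons]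
    cases hc : pvChild t.2 c with
    | none => simp [pvMem, hc]
    | some t' =>
      rw [hc] at h
      simp only at h
      simp only [pvMem, hc]
      cases hl : pvLongest? t' w with
      | some k' =>
        rw [hl] at h
        cases h
        exact ih t' k' hl j' (by omega) (by simp at hj; omega)
      | none =>
        rw [hl] at h
        split_ifs at h with ht
        cases h
        cases j' with
        | zero => omega
        | succ j'' => exact pvLongest_none w t' hl (j'' + 1) (by omega) (by simp at hj; omega)

-- one-step unfolding lemmas for the two loops
theorem pvLoopA_cons (sd : List (List Char)) (ch : Char) (rest : List Char) :
    pvLoopA sd (ch :: rest) =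
      match sd.find? (fun d => PySem.Chars.startswith (ch :: rest) d) with
      | some d =>
        if _h : d = [] then
          (if PySem.Chars.isalpha ch then 'L' else if PySem.Chars.isdigit ch then 'D' else 'S')
            :: pvLoopA sd rest
        else
          List.replicate d.length 'N' ++ pvLoopA sd ((ch :: rest).drop d.length)
      | none =>
        (if PySem.Chars.isalpha ch then 'L' else if PySem.Chars.isdigit ch then 'D' else 'S')
          :: pvLoopA sd rest := by
  rw [pvLoopA.eq_def]

theorem pvLoopB_cons (trie : Bool × PTrieL) (ch : Char) (rest : List Char) :
    pvLoopB trie (ch :: rest) =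
      if pvWalk trie (ch :: rest) 0 0 = 0 then
        (if PySem.Chars.isalpha ch then 'L' else if PySem.Chars.isdigit ch then 'D' else 'S')
          :: pvLoopB trie rest
      else
        List.replicate (pvWalk trie (ch :: rest) 0 0) 'N'
          ++ pvLoopB trie ((ch :: rest).drop (pvWalk trie (ch :: rest) 0 0)) := by
  rw [pvLoopB.eq_def]
  split <;> simp_all

-- the core agreement of the two loops: A's sorted-scan matcher and B's trie walk
-- find the same match length at every position
theorem pv_loops_eq (sortedDates : List (List Char)) (trie : Bool × PTrieL)
    (C : List (List Char))
    (hmemA : ∀ d, d ∈ sortedDates ↔ d ∈ C)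
    (hsorted : sortedDates.Pairwise (fun a b => b.length ≤ a.length))
    (hmemT : ∀ v, pvMem trie v = true ↔ v ∈ C ∧ v ≠ []) :
    ∀ s : List Char, pvLoopA sortedDates s = pvLoopB trie s := by
  intro s
  generalize hn : s.length = n
  induction n using Nat.strong_induction_on generalizing s with
  | _ n ih =>
    match s with
    | [] => rw [pvLoopA.eq_def, pvLoopB.eq_def]
    | ch :: rest =>
      have hlen : rest.length + 1 = n := by simpa using hn
      -- no nonempty candidate is a prefix → the walk finds nothing
      have hwalk := pvWalk_eq_longest (ch :: rest) trie 0 0 (le_refl 0)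
      have hnone_of : (∀ l, l ∈ C → l ≠ [] → ¬ l <+: (ch :: rest)) →
          pvWalk trie (ch :: rest) 0 0 = 0 := by
        intro hno
        cases hl : pvLongest? trie (ch :: rest) with
        | none => rw [hwalk, hl]
        | some k =>
          obtain ⟨h1, h2, h3⟩ := pvLongest_some _ _ _ hl
          obtain ⟨hC, hne⟩ := (hmemT _).mp h3
          exact absurd (List.take_prefix k (ch :: rest)) (hno _ hC hne)
      cases hA : sortedDates.find? (fun d => PySem.Chars.startswith (ch :: rest) d) with
      | none =>
        have hnoneA : ∀ d ∈ sortedDates, ¬ d <+: (ch :: rest) := by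
          intro d hd hpre
          have := List.find?_eq_none.mp hA d hd
          simp [PySem.Chars.startswith, List.isPrefixOf_iff_prefix] at this
          exact this hpre
        rw [pvLoopA_cons, hA]
        dsimp only
        rw [pvLoopB_cons, if_pos (hnone_of (fun l hC _ => hnoneA l ((hmemA l).mpr hC)))]
        rw [ih rest.length (by omega) rest rfl]
      | some d =>
        obtain ⟨hpd, as, bs, hsd, has⟩ := List.find?_eq_some_iff_append.mp hA
        have hdpre : d <+: (ch :: rest) := by
          simpa [PySem.Chars.startswith, List.isPrefixOf_iff_prefix] using hpd
        -- every candidate that is a prefix of the suffix is at most as long as the found one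
        have hmaxlen : ∀ l, l ∈ C → l <+: (ch :: rest) → l.length ≤ d.length := by
          intro l hC hpre
          have hl : l ∈ as ++ d :: bs := by rw [← hsd]; exact (hmemA l).mpr hC
          rcases List.mem_append.mp hl with hl | hl
          · exact absurd (by simpa [PySem.Chars.startswith, List.isPrefixOf_iff_prefix] using has l hl) (by simp [hpre])
          · rcases List.mem_cons.mp hl with rfl | hl
            · exact le_refl _
            · rw [hsd] at hsorted
              exact (List.pairwise_cons.mp (List.pairwise_append.mp hsorted).2.1).1 l hl
        by_cases hd : d = []
        · -- empty first match: A's truthiness sends it to the character branch;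
          -- the trie holds no empty word, and no longer candidate is a prefix
          have h0 : pvWalk trie (ch :: rest) 0 0 = 0 := by
            apply hnone_of
            intro l hC hne hpre
            have := hmaxlen l hC hpre
            rw [hd] at this
            simp only [List.length_nil, Nat.le_zero, List.length_eq_zero_iff] at this
            exact hne this
          rw [pvLoopA_cons, hA]
          dsimp only
          rw [dif_pos hd, pvLoopB_cons, if_pos h0]
          rw [ih rest.length (by omega) rest rfl]
        · -- nonempty first match: the walk's longest accepted prefix is exactly |d|
          have hdC : d ∈ C := (hmemA d).mp (List.mem_of_find?_eq_some hA)
          have hdlen : 1 ≤ d.length := List.length_pos_iff.mpr hd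
          have hdle : d.length ≤ (ch :: rest).length := hdpre.length_le
          have hmemd : pvMem trie ((ch :: rest).take d.length) = true := by
            rw [← List.prefix_iff_eq_take.mp hdpre]
            exact (hmemT d).mpr ⟨hdC, hd⟩
          have hbest : pvWalk trie (ch :: rest) 0 0 = d.length := by
            cases hl : pvLongest? trie (ch :: rest) with
            | none =>
              have := pvLongest_none _ _ hl d.length hdlen hdle
              rw [hmemd] at this; cases this
            | some k =>
              obtain ⟨h1, h2, h3⟩ := pvLongest_some _ _ _ hl
              rw [hwalk, hl]
              simp only [Nat.zero_add]
              rcases lt_trichotomy k d.length with h | h | h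
              · have := pvLongest_max _ _ _ hl d.length h hdle
                rw [hmemd] at this; cases this
              · exact h
              · obtain ⟨hC, hne⟩ := (hmemT _).mp h3
                have := hmaxlen _ hC (List.take_prefix k (ch :: rest))
                rw [List.length_take, min_eq_left h2] at this
                omega
          rw [pvLoopA_cons, hA]
          dsimp only
          rw [dif_neg hd, pvLoopB_cons, hbest, if_neg (by omega)]
          have := ih ((ch :: rest).drop d.length).length
            (by simp only [List.length_drop]; simp at hn ⊢; omega) ((ch :: rest).drop d.length) rfl
          rw [this]

-- ===== VERDICT (by name: the statement is the Claim_ definition above) =====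
theorem password_to_structure_spec : Claim_equal_password_to_structure := by
  unfold Claim_equal_password_to_structure Spec_password_to_structure
  intro password date_candidates _
  simp only [password_to_structure, password_to_structure_alt]
  congr 1
  apply pv_loops_eq _ _ (date_candidates.map String.toList)
  · intro d
    exact PySem.List.mem_sorted _ _ _ _
  · have := PySem.List.sorted_pairwise (date_candidates.map String.toList) (fun d => -((d.length : Int)))
    exact this.imp (by intro a b h; omega)
  · intro v
    exact pvMem_build _ _
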